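-- pv_equiv track=rewrite | github.com/lissity/AoC | 2016/Day07/main.py | check_SSL_support
-- ===== SOURCE A (Python) =====
-- def check_SSL_support(letter_seq):
--     abas = []
--     babs = []
--     inside_square_bracket = False
--     for i in range(0, len(letter_seq)-2):
--         if(letter_seq[i] == '['):
--             inside_square_bracket = True
--         elif (letter_seq[i] == ']'):
--             inside_square_bracket = False
--         elif (letter_seq[i].isalpha() and letter_seq[i+1].isalpha() and
--               letter_seq[i+2].isalpha()):
--             let_1 = letter_seq[i]
--             let_2 = letter_seq[i+1]
--             let_3 = letter_seq[i+2]
--             if(let_1 == let_2):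
--                 pass
--             elif(let_1 == let_3): # ABA/BAB found
--                 if (inside_square_bracket):
--                     babs.append(let_1+let_2+let_3)
--                 else:
--                     abas.append(let_1+let_2+let_3)
--     # Check found ABAs for corresponding BABs
--     for aba in set(abas):
--         corr_bab =  aba[1] + aba[0] + aba[1]
--         if corr_bab in set(babs):
--             return True
--     return False
-- ===== SOURCE B (Python) =====
-- def _collect(seg):
--     # sliding 3-window over one bracket-free segment, A's exact triple test
--     res = []
--     for i in range(len(seg) - 2):
--         a, b, c = seg[i], seg[i + 1], seg[i + 2]
--         if a.isalpha() and b.isalpha() and c.isalpha() and a != b and a == c: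
--             res.append(seg[i:i + 3])
--     return res
--
-- def check_SSL_support(letter_seq):
--     # split into alternating outside/inside-bracket segments in one pass
--     outside, inside = [], []
--     buf = []
--     in_br = False
--     for ch in letter_seq:
--         if ch == '[':
--             (inside if in_br else outside).append(''.join(buf))
--             buf = []
--             in_br = True
--         elif ch == ']':
--             (inside if in_br else outside).append(''.join(buf))
--             buf = []
--             in_br = False
--         else:
--             buf.append(ch)
--     (inside if in_br else outside).append(''.join(buf))
--     abas = [t for seg in outside for t in _collect(seg)]
--     babs = [t for seg in inside for t in _collect(seg)]
--     babs_set = set(babs)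
--     for aba in set(abas):
--         if aba[1] + aba[0] + aba[1] in babs_set:
--             return True
--     return False
-- ===== Notes on version B (the rewrite author's own statement) =====
-- stated objective: alternative
-- what changed: Replaces A's single indexed loop with a stateful bracket flag read at every position by a segmentation pass that splits the string into outside/inside-bracket segments, then an independent sliding-3-window scan of each segment; the set-based ABA/BAB cross-check is kept.
import Mathlib
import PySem

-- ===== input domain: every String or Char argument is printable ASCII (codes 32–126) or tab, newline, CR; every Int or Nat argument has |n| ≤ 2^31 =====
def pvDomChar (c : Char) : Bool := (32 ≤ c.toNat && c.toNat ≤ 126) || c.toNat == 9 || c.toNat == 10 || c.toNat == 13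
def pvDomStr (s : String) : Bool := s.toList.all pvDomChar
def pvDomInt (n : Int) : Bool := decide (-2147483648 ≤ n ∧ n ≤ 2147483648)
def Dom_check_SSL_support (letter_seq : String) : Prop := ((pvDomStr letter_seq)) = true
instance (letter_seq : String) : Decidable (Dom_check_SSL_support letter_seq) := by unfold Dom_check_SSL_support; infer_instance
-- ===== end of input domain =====

-- B replaces A's single indexed loop with a bracket flag by a segmentation pass plus
-- per-segment sliding-window scans; same O(n) cost, alternative decomposition.


-- ===== PORT A =====
-- aba[1] + aba[0] + aba[1]
def pvCorrBab (aba : String) : String :=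
  String.ofList [((PySem.Str.pyGet? aba 1).getD ' '), ((PySem.Str.pyGet? aba 0).getD ' '), ((PySem.Str.pyGet? aba 1).getD ' ')]

-- 'for aba in set(abas): if corr_bab in set(babs): return True / return False'
-- (result is order-independent over the set, ported as .any)
def pvFinalCheck (abas babs : List String) : Bool :=
  (PySem.Set.ofList abas).any (fun aba => (PySem.Set.ofList babs).contains (pvCorrBab aba))

-- A's loop 'for i in range(0, len-2)' reading s[i], s[i+1], s[i+2]: the obvious
-- structural recursion consuming one char per iteration with two chars of lookahead.
def pvLoopA : List Char → Bool → List String → List String → List String × List String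
  | c0 :: c1 :: c2 :: rest, ins, abas, babs =>
    if c0 = '[' then pvLoopA (c1 :: c2 :: rest) true abas babs
    else if c0 = ']' then pvLoopA (c1 :: c2 :: rest) false abas babs
    else if PySem.Chars.isalpha c0 && PySem.Chars.isalpha c1 && PySem.Chars.isalpha c2 then
      if c0 = c1 then pvLoopA (c1 :: c2 :: rest) ins abas babs
      else if c0 = c2 then
        if ins then pvLoopA (c1 :: c2 :: rest) ins abas (babs ++ [String.ofList [c0, c1, c2]])
        else pvLoopA (c1 :: c2 :: rest) ins (abas ++ [String.ofList [c0, c1, c2]]) babs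
      else pvLoopA (c1 :: c2 :: rest) ins abas babs
    else pvLoopA (c1 :: c2 :: rest) ins abas babs
  | _, _, abas, babs => (abas, babs)

def check_SSL_support (letter_seq : String) : Bool :=
  let p := pvLoopA letter_seq.toList false [] []
  pvFinalCheck p.1 p.2

-- ===== PORT B =====
-- _collect: sliding 3-window over one bracket-free segment
def pvCollect : List Char → List String
  | c0 :: c1 :: c2 :: rest =>
    (if PySem.Chars.isalpha c0 && PySem.Chars.isalpha c1 && PySem.Chars.isalpha c2
        && !(c0 == c1) && (c0 == c2) then [String.ofList [c0, c1, c2]] else [])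
      ++ pvCollect (c1 :: c2 :: rest)
  | _ => []

-- the segmentation pass: flush buf to the current side on each bracket, toggle the flag
def pvSegSplit : List Char → Bool → List Char → List (List Char) × List (List Char)
  | [], ins, buf => if ins then ([], [buf]) else ([buf], [])
  | c :: rest, ins, buf =>
    if c = '[' then
      let p := pvSegSplit rest true []
      if ins then (p.1, buf :: p.2) else (buf :: p.1, p.2)
    else if c = ']' then
      let p := pvSegSplit rest false []
      if ins then (p.1, buf :: p.2) else (buf :: p.1, p.2)
    else pvSegSplit rest ins (buf ++ [c])

def check_SSL_support_alt (letter_seq : String) : Bool :=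
  let p := pvSegSplit letter_seq.toList false []
  pvFinalCheck (p.1.flatMap pvCollect) (p.2.flatMap pvCollect)

-- ===== PRECONDITION & SPEC =====
def Spec_check_SSL_support (letter_seq : String) (out : Bool) : Prop := out = check_SSL_support_alt letter_seq
instance (letter_seq : String) (out : Bool) : Decidable (Spec_check_SSL_support letter_seq out) := by unfold Spec_check_SSL_support; infer_instance

-- ===== CLAIM (what is proved, stated in full; the proofs are below) =====
def Claim_equal_check_SSL_support : Prop := ∀ (letter_seq : String), Dom_check_SSL_support letter_seq → Spec_check_SSL_support letter_seq (check_SSL_support letter_seq)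

-- ===== LEMMAS AND PROOFS =====

-- a list with no brackets
def pvNB (m : List Char) : Prop := ∀ c ∈ m, c ≠ '[' ∧ c ≠ ']'

-- On a bracket-free run A's loop records exactly the sliding-window triples, on the side of the flag.
theorem pvLoopA_flat : ∀ (m : List Char) (ins : Bool) (abas babs : List String), pvNB m →
    pvLoopA m ins abas babs
      = (if ins then (abas, babs ++ pvCollect m) else (abas ++ pvCollect m, babs)) := by
  intro m
  induction m with
  | nil => intro ins abas babs _; cases ins <;> simp [pvLoopA, pvCollect]
  | cons c0 tail IH =>
    intro ins abas babs h
    have h0 := h c0 (by simp)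
    have htail : pvNB tail := fun c hc => h c (by simp [hc])
    rcases tail with _ | ⟨c1, tail2⟩
    · cases ins <;> simp [pvLoopA, pvCollect]
    rcases tail2 with _ | ⟨c2, rest⟩
    · cases ins <;> simp [pvLoopA, pvCollect]
    rw [pvLoopA]
    rw [if_neg h0.1, if_neg h0.2]
    by_cases ha : (PySem.Chars.isalpha c0 && PySem.Chars.isalpha c1 && PySem.Chars.isalpha c2) = true
    · rw [if_pos ha]
      by_cases h01 : c0 = c1
      · rw [if_pos h01, IH ins abas babs htail]
        have : pvCollect (c0 :: c1 :: c2 :: rest) = pvCollect (c1 :: c2 :: rest) := by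
          rw [pvCollect]; simp [h01]
        rw [this]
      · rw [if_neg h01]
        by_cases h02 : c0 = c2
        · rw [if_pos h02]
          have hcond : (PySem.Chars.isalpha c0 && PySem.Chars.isalpha c1 && PySem.Chars.isalpha c2
              && !(c0 == c1) && (c0 == c2)) = true := by
            simp only [Bool.and_eq_true, Bool.not_eq_true', beq_eq_false_iff_ne, ne_eq,
              beq_iff_eq] at ha ⊢
            exact ⟨⟨ha, h01⟩, h02⟩
          have hc : pvCollect (c0 :: c1 :: c2 :: rest)
              = String.ofList [c0, c1, c2] :: pvCollect (c1 :: c2 :: rest) := by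
            rw [pvCollect, if_pos hcond]; rfl
          cases ins
          · simp only [if_neg (by simp : ¬ (false = true))]
            rw [IH false (abas ++ [String.ofList [c0, c1, c2]]) babs htail]
            simp [hc]
          · rw [IH true abas (babs ++ [String.ofList [c0, c1, c2]]) htail]
            simp [hc]
        · rw [if_neg h02, IH ins abas babs htail]
          have : pvCollect (c0 :: c1 :: c2 :: rest) = pvCollect (c1 :: c2 :: rest) := by
            rw [pvCollect]; simp [h02]
          rw [this]
    · rw [if_neg ha, IH ins abas babs htail]
      have : pvCollect (c0 :: c1 :: c2 :: rest) = pvCollect (c1 :: c2 :: rest) := by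
        rw [pvCollect]; simp; intro h1 h2 h3; exact absurd (by simp [h1,h2,h3]) ha
      rw [this]

-- Crossing a bracket: the bracket-free prefix contributes its window triples, then the flag flips.
theorem pvLoopA_bracket : ∀ (m : List Char) (rest : List Char) (ins f' : Bool) (br : Char)
    (abas babs : List String), pvNB m → ((br = '[' ∧ f' = true) ∨ (br = ']' ∧ f' = false)) →
    pvLoopA (m ++ br :: rest) ins abas babs
      = pvLoopA rest f' (if ins then abas else abas ++ pvCollect m)
          (if ins then babs ++ pvCollect m else babs) := by
  intro m
  induction m with
  | nil =>
    intro rest ins f' br abas babs _ hbr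
    rcases rest with _ | ⟨r1, rest1⟩
    · rcases hbr with ⟨h1, h2⟩ | ⟨h1, h2⟩ <;> subst h1 <;> subst h2 <;>
        cases ins <;> simp [pvLoopA, pvCollect]
    rcases rest1 with _ | ⟨r2, rest2⟩
    · rcases hbr with ⟨h1, h2⟩ | ⟨h1, h2⟩ <;> subst h1 <;> subst h2 <;>
        cases ins <;> simp [pvLoopA, pvCollect]
    · rcases hbr with ⟨h1, h2⟩ | ⟨h1, h2⟩ <;> subst h1 <;> subst h2 <;>
        cases ins <;> simp [pvLoopA, pvCollect]
  | cons c0 m' IH =>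
    intro rest ins f' br abas babs h hbr
    have h0 := h c0 (by simp)
    have hm' : pvNB m' := fun c hc => h c (by simp [hc])
    have halbr : PySem.Chars.isalpha br = false := by
      rcases hbr with ⟨h1, _⟩ | ⟨h1, _⟩ <;> subst h1 <;> decide
    cases m' with
    | nil =>
      -- window (c0, br, r1?) — br not alpha, so nothing recorded
      cases rest with
      | nil => cases ins <;> simp [pvLoopA, pvCollect]
      | cons r1 rest1 =>
        have hstep := IH (r1 :: rest1) ins f' br abas babs (fun c hc => absurd hc (by simp)) hbr
        simp only [List.nil_append] at hstep
        simp only [List.cons_append, List.nil_append]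
        rw [pvLoopA, if_neg h0.1, if_neg h0.2, if_neg (by simp [halbr])]
        rw [hstep]
        cases ins <;> simp [pvCollect]
    | cons c1 m2 =>
    cases m2 with
    | nil =>
      -- window (c0, c1, br) — br not alpha
      have hstep := IH rest ins f' br abas babs (fun c hc => by
        simp at hc; subst hc; exact hm' _ (by simp)) hbr
      simp only [List.cons_append, List.nil_append] at hstep ⊢
      rw [pvLoopA, if_neg h0.1, if_neg h0.2, if_neg (by simp [halbr])]
      rw [hstep]
      cases ins <;> simp [pvCollect]
    | cons c2 m3 =>
      -- window (c0, c1, c2) entirely inside m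
      simp only [List.cons_append] at *
      rw [pvLoopA, if_neg h0.1, if_neg h0.2]
      by_cases ha : (PySem.Chars.isalpha c0 && PySem.Chars.isalpha c1 && PySem.Chars.isalpha c2) = true
      · rw [if_pos ha]
        by_cases h01 : c0 = c1
        · rw [if_pos h01, IH rest ins f' br abas babs hm' hbr]
          have : pvCollect (c0 :: c1 :: c2 :: m3) = pvCollect (c1 :: c2 :: m3) := by
            rw [pvCollect]; simp [h01]
          rw [this]
        · rw [if_neg h01]
          by_cases h02 : c0 = c2
          · rw [if_pos h02]
            have hcond : (PySem.Chars.isalpha c0 && PySem.Chars.isalpha c1 && PySem.Chars.isalpha c2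
                && !(c0 == c1) && (c0 == c2)) = true := by
              simp only [Bool.and_eq_true, Bool.not_eq_true', beq_eq_false_iff_ne, ne_eq,
                beq_iff_eq] at ha ⊢
              exact ⟨⟨ha, h01⟩, h02⟩
            have hc : pvCollect (c0 :: c1 :: c2 :: m3)
                = String.ofList [c0, c1, c2] :: pvCollect (c1 :: c2 :: m3) := by
              rw [pvCollect, if_pos hcond]; rfl
            cases ins
            · simp only [if_neg (by simp : ¬ (false = true))]
              rw [IH rest false f' br (abas ++ [String.ofList [c0, c1, c2]]) babs hm' hbr]
              simp [hc]
            · rw [IH rest true f' br abas (babs ++ [String.ofList [c0, c1, c2]]) hm' hbr]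
              simp [hc]
          · rw [if_neg h02, IH rest ins f' br abas babs hm' hbr]
            have : pvCollect (c0 :: c1 :: c2 :: m3) = pvCollect (c1 :: c2 :: m3) := by
              rw [pvCollect]; simp [h02]
            rw [this]
      · rw [if_neg ha, IH rest ins f' br abas babs hm' hbr]
        have : pvCollect (c0 :: c1 :: c2 :: m3) = pvCollect (c1 :: c2 :: m3) := by
          rw [pvCollect]; simp; intro h1 h2 h3; exact absurd (by simp [h1, h2, h3]) ha
        rw [this]

-- Main invariant: A's loop on buf ++ l equals B's segmentation + per-segment collection.
theorem pvMain : ∀ (l : List Char) (ins : Bool) (buf : List Char) (abas babs : List String),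
    pvNB buf →
    pvLoopA (buf ++ l) ins abas babs
      = (abas ++ ((pvSegSplit l ins buf).1.flatMap pvCollect),
         babs ++ ((pvSegSplit l ins buf).2.flatMap pvCollect)) := by
  intro l
  induction l with
  | nil =>
    intro ins buf abas babs h
    simp only [List.append_nil]
    rw [pvLoopA_flat buf ins abas babs h]
    cases ins <;> simp [pvSegSplit]
  | cons c rest IH =>
    intro ins buf abas babs h
    by_cases hc1 : c = '['
    · subst hc1
      rw [pvLoopA_bracket buf rest ins true '[' abas babs h (Or.inl ⟨rfl, rfl⟩)]
      have hIH := IH true [] (if ins then abas else abas ++ pvCollect buf)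
        (if ins then babs ++ pvCollect buf else babs) (fun c hc => absurd hc (by simp))
      simp only [List.nil_append] at hIH
      rw [hIH]
      cases ins <;> simp [pvSegSplit, List.append_assoc]
    by_cases hc2 : c = ']'
    · subst hc2
      rw [pvLoopA_bracket buf rest ins false ']' abas babs h (Or.inr ⟨rfl, rfl⟩)]
      have hIH := IH false [] (if ins then abas else abas ++ pvCollect buf)
        (if ins then babs ++ pvCollect buf else babs) (fun c hc => absurd hc (by simp))
      simp only [List.nil_append] at hIH
      rw [hIH]
      cases ins <;> simp [pvSegSplit, List.append_assoc]
    · have hnb : pvNB (buf ++ [c]) := by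
        intro x hx
        rcases List.mem_append.1 hx with h1 | h2
        · exact h x h1
        · simp at h2; subst h2; exact ⟨hc1, hc2⟩
      have hsplit : buf ++ c :: rest = (buf ++ [c]) ++ rest := by simp
      rw [hsplit, IH ins (buf ++ [c]) abas babs hnb]
      simp [pvSegSplit, hc1, hc2]

-- ===== VERDICT (by name: the statement is the Claim_ definition above) =====
theorem check_SSL_support_spec : Claim_equal_check_SSL_support := by
  intro s _
  unfold Spec_check_SSL_support check_SSL_support check_SSL_support_alt
  have h := pvMain s.toList false [] [] [] (by intro c hc; cases hc)
  simp at h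
  simp [h]
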